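-- pv_equiv track=rewrite | github.com/Kenneth-Wong/MMSceneGraph | mmdet/patches/visualization/image.py | get_name_dict
-- ===== SOURCE A (Python) =====
-- def get_name_dict(class_names, labels):
--     name_cnt = {n: 1 for n in class_names}
--     name_dict = {}
--     for idx, l in enumerate(labels):
--         name = class_names[l]
--         suffix = name_cnt[name]
--         name_cnt[name] += 1
--         name_dict[idx] = name + '_' + str(suffix)
--     return name_dict
-- ===== SOURCE B (Python) =====
-- def get_name_dict(class_names, labels):
--     # Pass 1: group the occurrence indices of each resolved name, in encounter order.
--     groups = {}
--     for idx, l in enumerate(labels):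
--         groups.setdefault(class_names[l], []).append(idx)
--     # Pass 2: number each group's occurrences 1, 2, 3, ...
--     numbered = {}
--     for name, idxs in groups.items():
--         for j, idx in enumerate(idxs):
--             numbered[idx] = name + '_' + str(j + 1)
--     # Emit keyed in index order.
--     return {idx: numbered[idx] for idx in range(len(labels))}
-- ===== Notes on version B (the rewrite author's own statement) =====
-- stated objective: alternative
-- what changed: Replaces A's single pass with a running per-name counter by a staged group-then-number algorithm: first group occurrence indices by resolved name into a dict, then assign each group's indices sequential suffixes 1,2,3,..., finally emit keyed in index order.
import Mathlib
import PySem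

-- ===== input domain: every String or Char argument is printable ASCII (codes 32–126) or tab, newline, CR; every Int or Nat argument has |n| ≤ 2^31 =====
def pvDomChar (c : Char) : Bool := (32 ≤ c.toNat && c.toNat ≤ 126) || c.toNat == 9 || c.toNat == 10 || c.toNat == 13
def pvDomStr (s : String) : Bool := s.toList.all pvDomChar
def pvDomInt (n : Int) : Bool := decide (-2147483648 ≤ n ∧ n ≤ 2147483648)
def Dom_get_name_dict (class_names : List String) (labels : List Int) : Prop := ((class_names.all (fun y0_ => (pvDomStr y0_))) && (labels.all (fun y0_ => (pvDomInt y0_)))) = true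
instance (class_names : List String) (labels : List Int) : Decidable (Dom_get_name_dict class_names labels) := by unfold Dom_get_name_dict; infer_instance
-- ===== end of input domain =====

-- B replaces A's single pass with a running per-name counter by a staged group-then-number decomposition (alternative, not faster); same return value wherever A returns.


-- ===== PORT A =====
-- loop body of A: name = class_names[l]; suffix = name_cnt[name]; name_cnt[name] += 1; name_dict[idx] = name + '_' + str(suffix)
def pvStepA (class_names : List String)
    (st : PySem.Dict String Int × PySem.Dict Int String) (p : Int × Int) :
    PySem.Dict String Int × PySem.Dict Int String :=
  let name := (PySem.List.pyGet? class_names p.2).getD ""   -- IndexError excluded by Pre_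
  let suffix := st.1.getD name 0                            -- key always present under Pre_
  (st.1.insert name (suffix + 1),
   st.2.insert p.1 (name ++ "_" ++ PySem.Int.toStr suffix))

def get_name_dict (class_names : List String) (labels : List Int) : List (Int × String) :=
  let name_cnt := class_names.foldl (fun d n => d.insert n 1) (PySem.Dict.empty : PySem.Dict String Int)
  (((PySem.List.enumerate labels).foldl (pvStepA class_names)
      (name_cnt, (PySem.Dict.empty : PySem.Dict Int String))).2).items

-- ===== PORT B =====
-- pass 1: groups.setdefault(class_names[l], []).append(idx)  (== groups[name] = groups.get(name, []) + [idx])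
def get_name_dict_alt (class_names : List String) (labels : List Int) : List (Int × String) :=
  let groups := (PySem.List.enumerate labels).foldl
      (fun d p => d.modify ((PySem.List.pyGet? class_names p.2).getD "") [] (· ++ [p.1]))
      (PySem.Dict.empty : PySem.Dict String (List Int))
  -- pass 2: for name, idxs in groups.items(): for j, idx in enumerate(idxs): numbered[idx] = name + '_' + str(j+1)
  let numbered := groups.items.foldl
      (fun d p => (PySem.List.enumerate p.2).foldl
          (fun d2 q => d2.insert q.2 (p.1 ++ "_" ++ PySem.Int.toStr (q.1 + 1))) d)
      (PySem.Dict.empty : PySem.Dict Int String)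
  -- emit: {idx: numbered[idx] for idx in range(len(labels))}  (key always present under Pre_)
  (List.range labels.length).map (fun i => (((i : Nat) : Int), numbered.getD ((i : Nat) : Int) ""))

-- ===== PRECONDITION & SPEC =====
-- Pre_ excludes exactly the labels that are out of range for class_names, where A raises IndexError.
def Pre_get_name_dict (class_names : List String) (labels : List Int) : Prop :=
  ∀ l ∈ labels, PySem.Raise.InRange class_names.length l
instance (class_names : List String) (labels : List Int) : Decidable (Pre_get_name_dict class_names labels) := by unfold Pre_get_name_dict; infer_instance
def pvWitness_get_name_dict : List String × List Int := (["cat", "dog"], [0, 1, 0, -1])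

def Spec_get_name_dict (class_names : List String) (labels : List Int) (out : List (Int × String)) : Prop := out = get_name_dict_alt class_names labels
instance (class_names : List String) (labels : List Int) (out : List (Int × String)) : Decidable (Spec_get_name_dict class_names labels out) := by unfold Spec_get_name_dict; infer_instance

-- ===== CLAIM (what is proved, stated in full; the proofs are below) =====
def Claim_equal_get_name_dict : Prop := ∀ (class_names : List String) (labels : List Int), Dom_get_name_dict class_names labels → Pre_get_name_dict class_names labels → Spec_get_name_dict class_names labels (get_name_dict class_names labels)

-- ===== LEMMAS AND PROOFS =====

-- common reference shape of A's output: successive keys from s, suffix = count of the name so far + 1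
def pvBuild (pre : List String) (s : Int) : List String → List (Int × String)
  | [] => []
  | n :: rest => (s, n ++ "_" ++ PySem.Int.toStr ((pre.count n : Int) + 1)) :: pvBuild (pre ++ [n]) (s + 1) rest

lemma pvInitCnt (class_names : List String) (x : String) (d : PySem.Dict String Int) :
    (class_names.foldl (fun d n => d.insert n 1) d).getD x 0
      = if x ∈ class_names then 1 else d.getD x 0 := by
  induction class_names generalizing d with
  | nil => simp
  | cons c cs ih =>
      simp only [List.foldl_cons, ih, List.mem_cons]
      by_cases hx : x ∈ cs
      · simp [hx]
      · by_cases hc : x = c <;> simp [hx, hc, PySem.Dict.getD_insert]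

lemma pvALoop (class_names : List String) (labels : List Int) (pre : List String) (s : Nat)
    (cnt : PySem.Dict String Int) (nd : PySem.Dict Int String)
    (hc : ∀ l ∈ labels, cnt.getD ((PySem.List.pyGet? class_names l).getD "") 0
            = (pre.count ((PySem.List.pyGet? class_names l).getD "") : Int) + 1)
    (hk : ∀ k ∈ nd.keys, k < (s : Int)) :
    (((PySem.List.enumerate labels (s : Int)).foldl (pvStepA class_names) (cnt, nd)).2).items
      = nd.items ++ pvBuild pre (s : Int) (labels.map (fun l => (PySem.List.pyGet? class_names l).getD "")) := by
  induction labels generalizing pre s cnt nd with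
  | nil => simp [PySem.List.enumerate_nil, pvBuild]
  | cons l rest ih =>
      have hfresh : nd.contains (s : Int) = false := by
        rcases h : nd.contains (s : Int) with _ | _
        · rfl
        · have := hk _ ((PySem.Dict.contains_iff_mem_keys nd (s : Int)).1 h)
          omega
      simp only [PySem.List.enumerate_cons, List.foldl_cons, List.map_cons, pvBuild]
      have hsuf := hc l (by simp)
      have hstep : pvStepA class_names (cnt, nd) ((s : Int), l)
          = (cnt.insert ((PySem.List.pyGet? class_names l).getD "")
               (((pre.count ((PySem.List.pyGet? class_names l).getD "") : Int) + 1) + 1),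
             nd.insert (s : Int) ((PySem.List.pyGet? class_names l).getD "" ++ "_" ++
               PySem.Int.toStr ((pre.count ((PySem.List.pyGet? class_names l).getD "") : Int) + 1))) := by
        simp only [pvStepA, hsuf]
      rw [hstep]
      have hs1 : ((s : Int) + 1) = ((s + 1 : Nat) : Int) := by push_cast; ring
      rw [hs1, ih (pre ++ [(PySem.List.pyGet? class_names l).getD ""]) (s + 1) _ _ ?_ ?_]
      · rw [PySem.Dict.items_insert, hfresh]
        simp only [Bool.false_eq_true, if_false, List.append_assoc, List.singleton_append]
      · intro l' hl'
        by_cases he : ((PySem.List.pyGet? class_names l').getD "")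
                        = ((PySem.List.pyGet? class_names l).getD "")
        · rw [he, PySem.Dict.getD_insert_self]
          simp [List.count_append]
        · rw [PySem.Dict.getD_insert, if_neg he, hc l' (by simp [hl'])]
          simp [List.count_append, Ne.symm he]
      · intro k hk'
        rcases (PySem.Dict.mem_keys_insert _ _ _ _).1 hk' with h | h
        · subst h; push_cast; omega
        · have := hk _ h; push_cast; omega

lemma pvMemOfPre (class_names : List String) (l : Int)
    (h : PySem.Raise.InRange class_names.length l) :
    ((PySem.List.pyGet? class_names l).getD "") ∈ class_names := by
  rcases hg : PySem.List.pyGet? class_names l with _ | x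
  · exact absurd h (by rw [← PySem.List.pyGet?_eq_none_iff class_names l]; exact hg)
  · simpa using PySem.List.mem_of_pyGet?_eq_some class_names hg

-- the prefix-count map form of the answer equals pvBuild
lemma pvBLoop (ns : List String) (pre : List String) (s : Nat) :
    (List.range ns.length).map (fun (i : Nat) =>
        (((s + i : Nat) : Int), ns.getD i "" ++ "_" ++ PySem.Int.toStr ((((pre ++ ns.take i).count (ns.getD i "")) : Int) + 1)))
      = pvBuild pre (s : Int) ns := by
  induction ns generalizing pre s with
  | nil => simp [pvBuild]
  | cons n rest ih =>
      simp only [List.length_cons, List.range_succ_eq_map, List.map_cons, List.map_map, pvBuild]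
      congr 1
      · simp
      · rw [show ((s : Int) + 1) = ((s + 1 : Nat) : Int) by push_cast; ring,
            ← ih (pre ++ [n]) (s + 1)]
        apply List.map_congr_left
        intro i _
        simp only [Function.comp_apply]
        have h1 : s + i.succ = s + 1 + i := by omega
        simp [h1, List.take_succ_cons, List.count_append, List.append_assoc]

-- the ascending index list of occurrences of name n in ns, starting at position s
def pvIdxs (n : String) (s : Int) : List String → List Int
  | [] => []
  | x :: rest => (if x = n then [s] else []) ++ pvIdxs n (s + 1) rest

lemma pvIdxs_lb (n : String) (s : Int) (ns : List String) :
    ∀ x ∈ pvIdxs n s ns, s ≤ x := by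
  induction ns generalizing s with
  | nil => simp [pvIdxs]
  | cons c rest ih =>
      intro x hx
      simp only [pvIdxs, List.mem_append] at hx
      rcases hx with h | h
      · split_ifs at h <;> simp_all
      · have := ih (s + 1) x h; omega

lemma pvIdxs_nodup (n : String) (s : Int) (ns : List String) :
    (pvIdxs n s ns).Nodup := by
  induction ns generalizing s with
  | nil => simp [pvIdxs]
  | cons c rest ih =>
      simp only [pvIdxs]
      split_ifs with h
      · simp only [List.singleton_append, List.nodup_cons]
        exact ⟨fun hm => by have := pvIdxs_lb n (s + 1) rest s hm; omega, ih (s + 1)⟩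
      · simpa using ih (s + 1)

lemma pvIdxs_mem (n : String) (s : Nat) (ns : List String) (i : Nat) (hi : i < ns.length) :
    (((s + i : Nat) : Int) ∈ pvIdxs n (s : Int) ns ↔ ns.getD i "" = n) := by
  induction ns generalizing s i with
  | nil => simp at hi
  | cons c rest ih =>
      cases i with
      | zero =>
          simp only [pvIdxs, Nat.add_zero, List.getD_cons_zero, List.mem_append]
          constructor
          · rintro (h | h)
            · by_cases hcn : c = n
              · exact hcn
              · rw [if_neg hcn] at h; simp at h
            · exfalso; have := pvIdxs_lb n ((s : Int) + 1) rest _ h; omega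
          · intro h; simp [h]
      | succ j =>
          have hj : j < rest.length := by simpa using hi
          have hq : ((s + (j + 1) : Nat) : Int) = (((s + 1) + j : Nat) : Int) := by push_cast; ring
          have hs1 : ((s : Int) + 1) = ((s + 1 : Nat) : Int) := by push_cast; ring
          rw [List.getD_cons_succ, ← ih (s + 1) j hj]
          simp only [pvIdxs, List.mem_append, hq, hs1]
          constructor
          · rintro (h | h)
            · exfalso
              have hne : (((s + 1) + j : Nat) : Int) ≠ (s : Int) := by push_cast; omega
              by_cases hcn : c = n
              · rw [if_pos hcn] at h; simp at h; exact hne h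
              · rw [if_neg hcn] at h; simp at h
            · exact h
          · exact Or.inr

lemma pvIdxs_pos (n : String) (s : Nat) (ns : List String) (i : Nat) (hi : i < ns.length)
    (hn : ns.getD i "" = n) :
    (pvIdxs n (s : Int) ns).idxOf ((s + i : Nat) : Int) = (ns.take i).count n := by
  induction ns generalizing s i with
  | nil => simp at hi
  | cons c rest ih =>
      cases i with
      | zero =>
          have hc : c = n := by simpa using hn
          simp [pvIdxs, hc]
      | succ j =>
          have hj : j < rest.length := by simpa using hi
          have hnj : rest.getD j "" = n := by simpa using hn
          have hq : ((s + (j + 1) : Nat) : Int) = (((s + 1) + j : Nat) : Int) := by push_cast; ring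
          have hs1 : ((s : Int) + 1) = ((s + 1 : Nat) : Int) := by push_cast; ring
          rw [List.take_succ_cons]
          by_cases hcn : c = n
          · have hne : ((s : Int)) ≠ (((s + 1) + j : Nat) : Int) := by push_cast; omega
            simp only [pvIdxs, if_pos hcn, List.singleton_append, hq, hs1, List.idxOf_cons]
            rw [ih (s + 1) j hj hnj]
            have hb : (((s : Int)) == ((s : Int) + 1 + (j : Int))) = false := by
              simp only [beq_eq_false_iff_ne, ne_eq]; omega
            simp [hcn, hb]
          · simp only [pvIdxs, if_neg hcn, List.nil_append, hq, hs1]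
            rw [ih (s + 1) j hj hnj]
            simp [hcn]

-- inner numbering loop of B: for j, idx in enumerate(idxs, s): d[idx] = n + '_' + str(j+1)
lemma pvInner (n : String) (idxs : List Int) (hnd : idxs.Nodup) (s : Nat)
    (d : PySem.Dict Int String) (i : Int) :
    ((PySem.List.enumerate idxs (s : Int)).foldl
        (fun d2 q => d2.insert q.2 (n ++ "_" ++ PySem.Int.toStr (q.1 + 1))) d).getD i ""
      = if i ∈ idxs then n ++ "_" ++ PySem.Int.toStr (((s + idxs.idxOf i : Nat) : Int) + 1)
        else d.getD i "" := by
  induction idxs generalizing s d with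
  | nil => simp [PySem.List.enumerate_nil]
  | cons x rest ih =>
      have hx : x ∉ rest := (List.nodup_cons.1 hnd).1
      have hs1 : ((s : Int) + 1) = ((s + 1 : Nat) : Int) := by push_cast; ring
      simp only [PySem.List.enumerate_cons, List.foldl_cons, hs1]
      rw [ih (List.nodup_cons.1 hnd).2 (s + 1)]
      by_cases hmem : i ∈ rest
      · have hne : i ≠ x := fun h => hx (h ▸ hmem)
        have hb : (x == i) = false := by
          simp only [beq_eq_false_iff_ne, ne_eq]; exact fun h => hne h.symm
        simp only [hmem, if_true, List.mem_cons, or_true, List.idxOf_cons, hb, cond_false]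
        congr 2
        push_cast; omega
      · by_cases hix : i = x
        · subst hix
          simp [hmem, PySem.Dict.getD_insert_self]
        · simp [hmem, hix, PySem.Dict.getD_insert]

-- outer loop of B over the groups: only the (unique) group containing i sets key i
lemma pvOuter (L : List (String × List Int)) (d : PySem.Dict Int String) (i : Int)
    (n0 : String) (idxs0 : List Int)
    (hnd : ∀ p ∈ L, p.2.Nodup)
    (huniq : ∀ p ∈ L, i ∈ p.2 → p = (n0, idxs0))
    (hex : ∃ p ∈ L, i ∈ p.2) :
    (L.foldl (fun d p => (PySem.List.enumerate p.2).foldl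
        (fun d2 q => d2.insert q.2 (p.1 ++ "_" ++ PySem.Int.toStr (q.1 + 1))) d) d).getD i ""
      = n0 ++ "_" ++ PySem.Int.toStr (((idxs0.idxOf i : Nat) : Int) + 1) := by
  induction L generalizing d with
  | nil => simp at hex
  | cons p rest ih =>
      simp only [List.foldl_cons]
      by_cases hrest : ∃ q ∈ rest, i ∈ q.2
      · exact ih _ (fun q hq => hnd q (by simp [hq])) (fun q hq => huniq q (by simp [hq])) hrest
      · -- i occurs in no tail group: the tail fold preserves key i
        have hpres : ∀ (d' : PySem.Dict Int String),
            (rest.foldl (fun d p => (PySem.List.enumerate p.2).foldl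
                (fun d2 q => d2.insert q.2 (p.1 ++ "_" ++ PySem.Int.toStr (q.1 + 1))) d) d').getD i ""
              = d'.getD i "" := by
          clear ih huniq hex
          induction rest with
          | nil => intro d'; simp
          | cons q rs ihr =>
              intro d'
              simp only [List.foldl_cons]
              rw [ihr (fun r hr => hnd r (by simp [List.mem_cons] at hr ⊢; tauto))
                    (fun h => hrest (by rcases h with ⟨r, hr, hir⟩; exact ⟨r, by simp [hr], hir⟩))]
              have hq2 : q.2.Nodup := hnd q (by simp)
              have hni : i ∉ q.2 := fun h => hrest ⟨q, by simp, h⟩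
              have h0 := pvInner q.1 q.2 hq2 0 d' i
              simp only [Nat.cast_zero] at h0
              simpa [hni] using h0
        rw [hpres]
        have hpin : i ∈ p.2 := by
          rcases hex with ⟨q, hq, hiq⟩
          rcases List.mem_cons.1 hq with h | h
          · exact h ▸ hiq
          · exact absurd ⟨q, h, hiq⟩ hrest
        have hp : p = (n0, idxs0) := huniq p (by simp) hpin
        have h0 := pvInner p.1 p.2 (hnd p (by simp)) 0 d i
        simp only [Nat.cast_zero] at h0
        rw [h0, if_pos hpin, hp]
        simp

lemma pvEnumMapSnd {α β : Type} (f : α → β) (l : List α) (s : Int) :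
    (PySem.List.enumerate l s).map (fun p => f p.2) = l.map f := by
  induction l generalizing s with
  | nil => simp [PySem.List.enumerate_nil]
  | cons x rest ih => simp [PySem.List.enumerate_cons, ih]

lemma pvPairsFilter (cn : List String) (labels : List Int) (n : String) (s : Nat) :
    ((((PySem.List.enumerate labels (s : Int)).map
          (fun p => ((PySem.List.pyGet? cn p.2).getD "", p.1))).filter
        (fun p => p.1 == n)).map (fun p => p.2))
      = pvIdxs n (s : Int) (labels.map (fun l => (PySem.List.pyGet? cn l).getD "")) := by
  induction labels generalizing s with
  | nil => simp [PySem.List.enumerate_nil, pvIdxs]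
  | cons l rest ih =>
      have hs1 : ((s : Int) + 1) = ((s + 1 : Nat) : Int) := by push_cast; ring
      have ht := ih (s + 1)
      rw [← hs1] at ht
      simp only [PySem.List.enumerate_cons, List.map_cons, List.filter_cons, pvIdxs]
      by_cases h : (PySem.List.pyGet? cn l).getD "" = n
      · simp [h, ht]
      · simp [h, ht]

-- groups[n] is the ascending list of indices whose resolved name is n
lemma pvGroupsGetD (cn : List String) (labels : List Int) (n : String) :
    ((PySem.List.enumerate labels).foldl
        (fun d p => d.modify ((PySem.List.pyGet? cn p.2).getD "") [] (· ++ [p.1]))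
        (PySem.Dict.empty : PySem.Dict String (List Int))).getD n []
      = pvIdxs n 0 (labels.map (fun l => (PySem.List.pyGet? cn l).getD "")) := by
  have hf : (PySem.List.enumerate labels).foldl
        (fun d p => d.modify ((PySem.List.pyGet? cn p.2).getD "") [] (· ++ [p.1]))
        (PySem.Dict.empty : PySem.Dict String (List Int))
      = (((PySem.List.enumerate labels).map
            (fun p => ((PySem.List.pyGet? cn p.2).getD "", p.1))).foldl
          (fun d q => d.modify q.1 [] (· ++ [q.2]))
          (PySem.Dict.empty : PySem.Dict String (List Int))) := by
    rw [List.foldl_map]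
  rw [hf, PySem.Dict.getD_foldl_modify_append, PySem.Dict.getD_empty]
  have := pvPairsFilter cn labels n 0
  simp only [Nat.cast_zero] at this
  rw [List.nil_append, ← this]

lemma pvGroupsKeys (cn : List String) (labels : List Int) :
    ((PySem.List.enumerate labels).foldl
        (fun d p => d.modify ((PySem.List.pyGet? cn p.2).getD "") [] (· ++ [p.1]))
        (PySem.Dict.empty : PySem.Dict String (List Int))).keys
      = PySem.Set.ofList (labels.map (fun l => (PySem.List.pyGet? cn l).getD "")) := by
  rw [PySem.Dict.keys_foldl_modify_key]
  rw [pvEnumMapSnd (fun l => (PySem.List.pyGet? cn l).getD "") labels 0]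
  simp [PySem.Set.update_nil_left]

lemma pvGroupsNodup (cn : List String) (labels : List Int) :
    ((PySem.List.enumerate labels).foldl
        (fun d p => d.modify ((PySem.List.pyGet? cn p.2).getD "") [] (· ++ [p.1]))
        (PySem.Dict.empty : PySem.Dict String (List Int))).keys.Nodup := by
  exact PySem.Dict.nodup_keys_foldl_modify_key _ _ _ _ _ (by simp)

-- value of B's numbered dict at a valid index: name + '_' + str(prefix count + 1)
lemma pvNumbered (cn : List String) (labels : List Int) (i : Nat) (hi : i < labels.length) :
    ((((PySem.List.enumerate labels).foldl
          (fun d p => d.modify ((PySem.List.pyGet? cn p.2).getD "") [] (· ++ [p.1]))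
          (PySem.Dict.empty : PySem.Dict String (List Int))).items.foldl
        (fun d p => (PySem.List.enumerate p.2).foldl
            (fun d2 q => d2.insert q.2 (p.1 ++ "_" ++ PySem.Int.toStr (q.1 + 1))) d)
        (PySem.Dict.empty : PySem.Dict Int String)).getD ((i : Nat) : Int) "")
      = (labels.map (fun l => (PySem.List.pyGet? cn l).getD "")).getD i "" ++ "_" ++
          PySem.Int.toStr ((((labels.map (fun l => (PySem.List.pyGet? cn l).getD "")).take i).count
            ((labels.map (fun l => (PySem.List.pyGet? cn l).getD "")).getD i "") : Int) + 1) := by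
  set names := labels.map (fun l => (PySem.List.pyGet? cn l).getD "") with hnames
  set groups := (PySem.List.enumerate labels).foldl
      (fun d p => d.modify ((PySem.List.pyGet? cn p.2).getD "") [] (· ++ [p.1]))
      (PySem.Dict.empty : PySem.Dict String (List Int)) with hgroups
  have hlen : i < names.length := by simpa [hnames] using hi
  set n0 := names.getD i "" with hn0
  have hitems : ∀ p ∈ groups.items, p = (p.1, pvIdxs p.1 0 names) := by
    intro p hp
    have := PySem.Dict.getD_of_mem_items (d := groups) (k := p.1) (v := p.2)
      (by simpa using hp) (pvGroupsNodup cn labels) (d0 := [])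
    have hg := pvGroupsGetD cn labels p.1
    rw [← hgroups] at hg
    ext1
    · rfl
    · simp only []
      rw [← this, hg]
  have hmemIff : ∀ (k : String), ((i : Nat) : Int) ∈ pvIdxs k 0 names ↔ names.getD i "" = k := by
    intro k
    have := pvIdxs_mem k 0 names i hlen
    simpa using this
  have hn0keys : n0 ∈ groups.keys := by
    rw [pvGroupsKeys cn labels, ← hnames, PySem.Set.mem_ofList]
    rw [hn0, List.getD_eq_getElem names "" hlen]
    exact List.getElem_mem hlen
  have hp0 : (n0, pvIdxs n0 0 names) ∈ groups.items := by
    have : (n0, groups.getD n0 []) ∈ groups.items := by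
      have hitems_map := PySem.Dict.items_eq_map_keys groups (pvGroupsNodup cn labels) ([] : List Int)
      rw [hitems_map]
      exact List.mem_map.2 ⟨n0, hn0keys, rfl⟩
    have hg := pvGroupsGetD cn labels n0
    rw [← hgroups] at hg
    rwa [hg] at this
  rw [pvOuter groups.items (PySem.Dict.empty : PySem.Dict Int String) ((i : Nat) : Int)
        n0 (pvIdxs n0 0 names) ?_ ?_ ?_]
  · have hpos := pvIdxs_pos n0 0 names i hlen (by rw [hn0])
    simp only [Nat.zero_add, Nat.cast_zero] at hpos
    rw [hpos]
  · intro p hp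
    rw [hitems p hp]
    exact pvIdxs_nodup p.1 0 names
  · intro p hp hip
    have hpe := hitems p hp
    rw [hpe] at hip ⊢
    simp only [] at hip
    have hk : names.getD i "" = p.1 := (hmemIff p.1).1 hip
    rw [hn0, hk]
  · refine ⟨(n0, pvIdxs n0 0 names), hp0, ?_⟩
    exact (hmemIff n0).2 hn0.symm

-- ===== VERDICT (by name: the statement is the Claim_ definition above) =====
theorem get_name_dict_spec : Claim_equal_get_name_dict := by
  intro class_names labels _ hpre
  unfold Spec_get_name_dict get_name_dict get_name_dict_alt
  -- A's side: the loop builds pvBuild over the resolved names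
  have hz : (0 : Int) = ((0 : Nat) : Int) := by norm_num
  rw [hz, pvALoop class_names labels [] 0 _ _ ?_ ?_]
  · -- B's side: numbered[i] is the prefix-count string, so B's map is pvBuild too
    rw [← pvBLoop (labels.map (fun l => (PySem.List.pyGet? class_names l).getD "")) [] 0]
    rw [show (PySem.Dict.empty : PySem.Dict Int String).items = [] from rfl, List.nil_append]
    simp only [List.length_map]
    apply List.map_congr_left
    intro i hi
    have hlen : i < labels.length := by simpa using List.mem_range.1 hi
    simp only [Nat.cast_zero]
    rw [pvNumbered class_names labels i hlen]
    simp
  · intro l hl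
    rw [pvInitCnt]
    simp [pvMemOfPre class_names l (hpre l hl)]
  · simp
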